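-- pv_equiv track=rewrite | github.com/createrman-system/anytomp4 | coder.py | _data_to_blocks
-- ===== SOURCE A (Python) =====
-- def _data_to_blocks(data):
--     """Converts data into 4-bit blocks"""
--     all_bits = []
--     for byte in data:
--         for i in range(7, -1, -1):
--             all_bits.append(str((byte >> i) & 1))
--
--     while len(all_bits) % 4 != 0:
--         all_bits.append('0')
--
--     blocks = [''.join(all_bits[i:i+4]) for i in range(0, len(all_bits), 4)]
--     return blocks
-- ===== SOURCE B (Python) =====
-- def _data_to_blocks(data):
--     """Converts data into 4-bit blocks"""
--     blocks = []
--     for byte in data: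
--         blocks.append(format((byte >> 4) & 0xF, '04b'))
--         blocks.append(format(byte & 0xF, '04b'))
--     return blocks
-- ===== Notes on version B (the rewrite author's own statement) =====
-- stated objective: simpler
-- what changed: B emits the two 4-bit nibble strings of each byte directly in one pass, removing A's intermediate flat bit list, its dead padding loop and the separate slicing/regrouping pass.
import Mathlib
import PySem

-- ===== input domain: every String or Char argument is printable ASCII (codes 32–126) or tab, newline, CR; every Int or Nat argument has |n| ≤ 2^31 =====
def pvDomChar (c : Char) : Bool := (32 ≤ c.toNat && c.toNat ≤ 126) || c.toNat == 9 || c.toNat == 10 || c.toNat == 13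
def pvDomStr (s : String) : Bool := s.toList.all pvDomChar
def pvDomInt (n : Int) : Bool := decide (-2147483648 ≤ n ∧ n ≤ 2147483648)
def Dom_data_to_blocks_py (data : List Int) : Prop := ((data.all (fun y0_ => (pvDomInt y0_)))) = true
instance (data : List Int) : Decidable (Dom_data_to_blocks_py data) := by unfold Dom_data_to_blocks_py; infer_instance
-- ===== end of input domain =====

-- B replaces A's flat bit list + regrouping pass by directly emitting each byte's two nibble strings (objective: simpler).

-- ===== PORT A =====
-- the 'while len(all_bits) % 4 != 0: all_bits.append('0')' loop of A
def pvPad4 (l : List String) : List String :=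
  if l.length % 4 ≠ 0 then pvPad4 (l ++ ["0"]) else l
termination_by (4 - l.length % 4) % 4
decreasing_by simp only [List.length_append, List.length_cons, List.length_nil]; omega

def data_to_blocks_py (data : List Int) : List String :=
  -- (byte >> i) & 1 ported as mod (floordiv byte 2^i) 2, exact for i ≥ 0 (here i ∈ 7..0)
  let all_bits : List String :=
    data.foldl (fun acc byte =>
      (PySem.List.pyRange 7 (-1) (-1)).foldl (fun acc2 i =>
        acc2 ++ [PySem.Int.toStr (PySem.Int.mod (PySem.Int.floordiv byte (2 ^ i.toNat)) 2)]) acc) []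
  let all_bits := pvPad4 all_bits
  (PySem.List.pyRange 0 (all_bits.length : Int) 4).map
    (fun i => PySem.Str.join "" (PySem.List.slice all_bits (some i) (some (i + 4))))

-- ===== PORT B =====
-- format(n, '04b') for 0 ≤ n < 16, ported by hand bit for bit (exact on that range)
def pvBitChar (n : Int) (k : Nat) : Char :=
  if PySem.Int.mod (PySem.Int.floordiv n (2 ^ k)) 2 = 1 then '1' else '0'

def pvFmt04b (n : Int) : String :=
  String.ofList [pvBitChar n 3, pvBitChar n 2, pvBitChar n 1, pvBitChar n 0]

def data_to_blocks_py_alt (data : List Int) : List String :=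
  -- (byte >> 4) & 0xF = mod (floordiv byte 16) 16;  byte & 0xF = mod byte 16
  data.foldl (fun blocks byte =>
    blocks ++ [pvFmt04b (PySem.Int.mod (PySem.Int.floordiv byte 16) 16),
               pvFmt04b (PySem.Int.mod byte 16)]) []

-- ===== PRECONDITION & SPEC =====
def Spec_data_to_blocks_py (data : List Int) (out : List String) : Prop := out = data_to_blocks_py_alt data
instance (data : List Int) (out : List String) : Decidable (Spec_data_to_blocks_py data out) := by unfold Spec_data_to_blocks_py; infer_instance

-- ===== CLAIM (what is proved, stated in full; the proofs are below) =====
def Claim_equal_data_to_blocks_py : Prop := ∀ (data : List Int), Dom_data_to_blocks_py data → Spec_data_to_blocks_py data (data_to_blocks_py data)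

-- ===== LEMMAS AND PROOFS =====

-- the string of one bit of b (A's str((b >> i) & 1))
def pvBitStr (b : Int) (i : Nat) : String :=
  PySem.Int.toStr (PySem.Int.mod (PySem.Int.floordiv b (2 ^ i)) 2)

def pvBits8 (b : Int) : List String :=
  [pvBitStr b 7, pvBitStr b 6, pvBitStr b 5, pvBitStr b 4,
   pvBitStr b 3, pvBitStr b 2, pvBitStr b 1, pvBitStr b 0]

lemma pvRange_desc8 : PySem.List.pyRange 7 (-1) (-1) = [7, 6, 5, 4, 3, 2, 1, 0] := by decide

lemma inner_foldl (acc : List String) (b : Int) :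
    (PySem.List.pyRange 7 (-1) (-1)).foldl (fun acc2 i =>
        acc2 ++ [PySem.Int.toStr (PySem.Int.mod (PySem.Int.floordiv b (2 ^ i.toNat)) 2)]) acc
      = acc ++ pvBits8 b := by
  rw [pvRange_desc8]
  simp [List.foldl, pvBits8, pvBitStr]

lemma outer_foldl (data : List Int) (acc : List String) :
    data.foldl (fun acc byte =>
      (PySem.List.pyRange 7 (-1) (-1)).foldl (fun acc2 i =>
        acc2 ++ [PySem.Int.toStr (PySem.Int.mod (PySem.Int.floordiv byte (2 ^ i.toNat)) 2)]) acc) acc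
      = acc ++ data.flatMap pvBits8 := by
  induction data generalizing acc with
  | nil => simp
  | cons b t ih => rw [List.foldl_cons, inner_foldl, ih]; simp

lemma alt_foldl (data : List Int) (acc : List String) :
    data.foldl (fun blocks byte =>
      blocks ++ [pvFmt04b (PySem.Int.mod (PySem.Int.floordiv byte 16) 16),
                 pvFmt04b (PySem.Int.mod byte 16)]) acc
      = acc ++ data.flatMap (fun b =>
          [pvFmt04b (PySem.Int.mod (PySem.Int.floordiv b 16) 16),
           pvFmt04b (PySem.Int.mod b 16)]) := by
  induction data generalizing acc with
  | nil => simp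
  | cons b t ih => rw [List.foldl_cons, ih]; simp

lemma length_flatMap_bits8 (data : List Int) : (data.flatMap pvBits8).length = 8 * data.length := by
  induction data with
  | nil => simp
  | cons b t ih => simp [pvBits8, ih]; ring

lemma pvPad4_of_mod (l : List String) (h : l.length % 4 = 0) : pvPad4 l = l := by
  rw [pvPad4]; simp [h]

-- A's grouping pass on a flatMap of 8-element blocks, as a map over List.range
lemma bitStr_eq (b : Int) (i : Nat) : pvBitStr b i = String.ofList [pvBitChar b i] := by
  unfold pvBitStr pvBitChar
  rcases PySem.Int.mod_two_eq (PySem.Int.floordiv b (2 ^ i)) with h | h <;> rw [h] <;> decide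

lemma join_two (c1 c2 c3 c4 : Char) :
    PySem.Str.join "" [String.ofList [c1], String.ofList [c2], String.ofList [c3], String.ofList [c4]]
      = String.ofList [c1, c2, c3, c4] := by
  have h := PySem.Str.toList_join "" [String.ofList [c1], String.ofList [c2], String.ofList [c3], String.ofList [c4]]
  have h2 : PySem.Chars.join [] ([c1, c2, c3, c4].map ([·])) = [c1, c2, c3, c4] :=
    PySem.Chars.join_nil_singletons [c1, c2, c3, c4]
  simp only [List.map_cons, List.map_nil, String.toList_ofList] at h h2
  have h3 : (PySem.Str.join "" [String.ofList [c1], String.ofList [c2], String.ofList [c3], String.ofList [c4]]).toList = [c1, c2, c3, c4] := by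
    rw [h]; exact h2
  rw [← h3, String.ofList_toList]

lemma bitChar_hi (b : Int) (k : Nat) (hk : k < 4) :
    pvBitChar (PySem.Int.mod (PySem.Int.floordiv b 16) 16) k = pvBitChar b (k + 4) := by
  unfold pvBitChar
  have m2 : forall a : Int, PySem.Int.mod a 2 = a % 2 := fun a => PySem.Int.mod_eq_emod_of_pos (by norm_num)
  have m16 : forall a : Int, PySem.Int.mod a 16 = a % 16 := fun a => PySem.Int.mod_eq_emod_of_pos (by norm_num)
  have d16 : forall a : Int, PySem.Int.floordiv a 16 = a / 16 := fun a => PySem.Int.floordiv_eq_ediv_of_pos (by norm_num)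
  have dp : forall (a : Int) (j : Nat), PySem.Int.floordiv a (2 ^ j) = a / 2 ^ j :=
    fun a j => PySem.Int.floordiv_eq_ediv_of_pos (by positivity)
  have h : b / 16 % 16 / 2 ^ k % 2 = b / 2 ^ (k + 4) % 2 := by
    interval_cases k <;> norm_num <;> omega
  rw [m2, m2, dp, dp, m16, d16, h]

lemma bitChar_lo (b : Int) (k : Nat) (hk : k < 4) :
    pvBitChar (PySem.Int.mod b 16) k = pvBitChar b k := by
  unfold pvBitChar
  have m2 : forall a : Int, PySem.Int.mod a 2 = a % 2 := fun a => PySem.Int.mod_eq_emod_of_pos (by norm_num)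
  have m16 : forall a : Int, PySem.Int.mod a 16 = a % 16 := fun a => PySem.Int.mod_eq_emod_of_pos (by norm_num)
  have dp : forall (a : Int) (j : Nat), PySem.Int.floordiv a (2 ^ j) = a / 2 ^ j :=
    fun a j => PySem.Int.floordiv_eq_ediv_of_pos (by positivity)
  have h : b % 16 / 2 ^ k % 2 = b / 2 ^ k % 2 := by
    interval_cases k <;> norm_num <;> omega
  rw [m2, m2, dp, dp, m16, h]

lemma hi_block (b : Int) :
    PySem.Str.join "" [pvBitStr b 7, pvBitStr b 6, pvBitStr b 5, pvBitStr b 4]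
      = pvFmt04b (PySem.Int.mod (PySem.Int.floordiv b 16) 16) := by
  simp only [bitStr_eq, join_two, pvFmt04b,
    bitChar_hi b 3 (by omega), bitChar_hi b 2 (by omega),
    bitChar_hi b 1 (by omega), bitChar_hi b 0 (by omega)]

lemma lo_block (b : Int) :
    PySem.Str.join "" [pvBitStr b 3, pvBitStr b 2, pvBitStr b 1, pvBitStr b 0]
      = pvFmt04b (PySem.Int.mod b 16) := by
  simp only [bitStr_eq, join_two, pvFmt04b,
    bitChar_lo b 3 (by omega), bitChar_lo b 2 (by omega),
    bitChar_lo b 1 (by omega), bitChar_lo b 0 (by omega)]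

lemma chunk_map (data : List Int) :
    (List.range (2 * data.length)).map
        (fun k => PySem.Str.join "" (((data.flatMap pvBits8).drop (4 * k)).take 4))
      = data.flatMap (fun b =>
          [pvFmt04b (PySem.Int.mod (PySem.Int.floordiv b 16) 16),
           pvFmt04b (PySem.Int.mod b 16)]) := by
  induction data with
  | nil => simp
  | cons b t ih =>
    simp only [List.length_cons, List.flatMap_cons]
    have h2 : 2 * (t.length + 1) = 2 * t.length + 1 + 1 := by ring
    rw [h2, List.range_succ_eq_map, List.map_cons, List.map_map,
        List.range_succ_eq_map, List.map_cons, List.map_map]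
    have fk : forall k : Nat, ((pvBits8 b ++ t.flatMap pvBits8).drop (4 * (k + 1 + 1))).take 4
        = ((t.flatMap pvBits8).drop (4 * k)).take 4 := by
      intro k
      have e : 4 * (k + 1 + 1) = 4 * k + 8 := by ring
      rw [e, ← List.drop_drop]
      simp [pvBits8]
    refine congrArg₂ _ ?_ (congrArg₂ _ ?_ ?_)
    · have f0 : ((pvBits8 b ++ t.flatMap pvBits8).drop (4 * 0)).take 4
          = [pvBitStr b 7, pvBitStr b 6, pvBitStr b 5, pvBitStr b 4] := by simp [pvBits8]
      rw [f0]; exact hi_block b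
    · have f1 : ((pvBits8 b ++ t.flatMap pvBits8).drop (4 * (0 + 1))).take 4
          = [pvBitStr b 3, pvBitStr b 2, pvBitStr b 1, pvBitStr b 0] := by simp [pvBits8]
      simp only [Function.comp_apply, Nat.succ_eq_add_one, Nat.zero_add]
      rw [show (4 * 1 : Nat) = 4 * (0 + 1) from rfl, f1]; exact lo_block b
    · rw [← ih]
      apply List.map_congr_left
      intro k hk
      simp only [Function.comp_apply, Nat.succ_eq_add_one]
      rw [fk k]

lemma slice_step4 (l : List String) (n : Nat) (h : l.length = 4 * n) :
    (PySem.List.pyRange 0 (l.length : Int) 4).map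
        (fun i => PySem.Str.join "" (PySem.List.slice l (some i) (some (i + 4))))
      = (List.range n).map (fun k => PySem.Str.join "" ((l.drop (4 * k)).take 4)) := by
  rw [PySem.List.pyRange_of_pos 0 (l.length : Int) (by norm_num)]
  have hn : (if (0:Int) < (l.length : Int) then (((l.length : Int) - 0 + 4 - 1) / 4).toNat else 0) = n := by
    rw [h]; push_cast; split_ifs <;> omega
  rw [hn, List.map_map]
  apply List.map_congr_left
  intro k hk
  have e1 : (0 : Int) + 4 * (k : Int) = ((4 * k : Nat) : Int) := by push_cast; ring
  have e2 : ((4 * k : Nat) : Int) + 4 = ((4 * k : Nat) : Int) + ((4 : Nat) : Int) := by norm_num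
  simp only [Function.comp, e1, e2, PySem.List.slice_natCast_add]

-- ===== VERDICT (by name: the statement is the Claim_ definition above) =====
theorem data_to_blocks_py_spec : Claim_equal_data_to_blocks_py := by
  intro data _
  unfold Spec_data_to_blocks_py data_to_blocks_py data_to_blocks_py_alt
  simp only [outer_foldl, alt_foldl, List.nil_append]
  rw [pvPad4_of_mod _ (by rw [length_flatMap_bits8]; omega)]
  rw [slice_step4 _ (2 * data.length) (by rw [length_flatMap_bits8]; ring)]
  exact chunk_map data
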